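-- pv_equiv track=rewrite | github.com/bilfor/nand | projects/10/2c/engine.py | compile_parameter_list
-- ===== SOURCE A (Python) =====
-- def advance(tokens, index):
--     index = index + 1
--     token, content, tag = get_token_data(tokens, index)
--     return index, token, content, tag
--
-- def current_token(tokens, index):
--     return tokens[index]
--
-- def get_tag(token):
--     start_tag_start = token.find("<") + 1
--     start_tag_end = token.find(">", start_tag_start)
--     return token[start_tag_start:start_tag_end]
--
-- def get_content(token):
--     start_tag_end = token.find(">") + 1
--     end_tag_start = token.rfind("<")
--     return token[start_tag_end:end_tag_start]
--
-- def get_token_data(tokens, index):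
--     token = current_token(tokens, index)
--     content = get_content(token)
--     tag = get_tag(token)
--     return token, content, tag
--
-- def compile_parameter_list(tokens, index, output):
--     output.append('<parameterList>')
--
--     token, content, tag = get_token_data(tokens, index)
--
--     if content == ')':
--         output.append("</parameterList>")
--         # output.append(token) # )
--         return index # empty parameterList
--
--     while True:
--         output.append(token) # type, if not empty list
--
--         index, token, content, tag = advance(tokens, index)
--         output.append(token) # varName
--
--         index, token, content, tag = advance(tokens, index)
--
--         if content != ',':
--             break # no more
--
--         output.append(token) # ,
--         index, token, content, tag = advance(tokens, index)
--
--     output.append("</parameterList>")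
--     # output.append(token) # )
--
--     return index
-- ===== SOURCE B (Python) =====
-- def get_content(token):
--     start_tag_end = token.find(">") + 1
--     end_tag_start = token.rfind("<")
--     return token[start_tag_end:end_tag_start]
--
-- def compile_parameter_list(tokens, index, output):
--     # Two-phase: scan separators to find the end of the parameter list first,
--     # then emit all parameter tokens at once as one contiguous slice.
--     output.append('<parameterList>')
--     if get_content(tokens[index]) == ')':
--         output.append('</parameterList>')
--         return index
--     end = index
--     while get_content(tokens[end + 2]) == ',':
--         end += 3
--     output.extend(tokens[i] for i in range(index, end + 2))
--     output.append('</parameterList>')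
--     return end + 2
-- ===== Notes on version B (the rewrite author's own statement) =====
-- stated objective: alternative
-- what changed: B replaces A's token-threading while-loop (advance/get_token_data re-reading every token) by a two-phase parse: a separator-only scan that steps 3 tokens at a time to locate the end of the parameter list, then a single bulk emit of the contiguous parameter tokens; the returned index is computed as end+2 instead of being threaded through advance calls.
import Mathlib
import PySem

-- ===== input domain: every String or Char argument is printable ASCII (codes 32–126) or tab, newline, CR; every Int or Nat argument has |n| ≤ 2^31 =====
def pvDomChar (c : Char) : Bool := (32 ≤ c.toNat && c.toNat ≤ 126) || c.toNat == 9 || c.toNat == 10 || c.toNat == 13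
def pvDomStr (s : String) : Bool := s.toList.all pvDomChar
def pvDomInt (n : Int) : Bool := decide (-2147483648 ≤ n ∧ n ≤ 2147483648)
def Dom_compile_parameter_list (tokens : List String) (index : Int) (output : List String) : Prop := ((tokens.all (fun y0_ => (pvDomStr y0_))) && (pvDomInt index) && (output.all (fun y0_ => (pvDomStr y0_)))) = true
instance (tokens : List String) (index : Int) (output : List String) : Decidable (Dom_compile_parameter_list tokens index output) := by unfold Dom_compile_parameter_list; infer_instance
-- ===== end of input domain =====

-- Both programs mutate `output` in place in Python (B performs the identical appends as A);
-- the ports return only the index, so the theorems here are about the RETURN value.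

-- ===== PORT A =====
-- get_content(token): token[token.find(">")+1 : token.rfind("<")]
def pvContent (t : String) : String :=
  PySem.Str.slice t (some (PySem.Str.find t ">" + 1)) (some (PySem.Str.rfind t "<"))

-- get_tag(token): token[token.find("<")+1 : token.find(">", start)]
def pvTag (t : String) : String :=
  let s := PySem.Str.find t "<" + 1
  PySem.Str.slice t (some s) (some (PySem.Str.findFrom t ">" s none))

-- A's `while True` loop; fuel only makes it total (IndexError cases return the raising
-- index; those inputs lie outside Pre_compile_parameter_list).
def pvLoopA (tokens : List String) (fuel : Nat) (index : Int) (token : String)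
    (output : List String) : Int :=
  match fuel with
  | 0 => index
  | Nat.succ fuel =>
    let output := output ++ [token]                    -- output.append(token)  (type)
    let index := index + 1                             -- advance
    match PySem.List.pyGet? tokens index with
    | none => index
    | some token =>
      let output := output ++ [token]                  -- output.append(token)  (varName)
      let index := index + 1                           -- advance
      match PySem.List.pyGet? tokens index with
      | none => index
      | some token =>
        let content := pvContent token
        if content ≠ "," then index                    -- break: return index
        else
          let output := output ++ [token]              -- output.append(token)  (,)
          let index := index + 1                       -- advance
          match PySem.List.pyGet? tokens index with
          | none => index
          | some token => pvLoopA tokens fuel index token output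

def compile_parameter_list (tokens : List String) (index : Int) (output : List String) : Int :=
  let output := output ++ ["<parameterList>"]
  match PySem.List.pyGet? tokens index with
  | none => index
  | some token =>
    let content := pvContent token
    let _tag := pvTag token
    if content = ")" then index                        -- empty parameterList
    else pvLoopA tokens (tokens.length + 1) index token output

-- ===== PORT B =====
-- B's separator scan: while get_content(tokens[end+2]) == ',': end += 3
def pvScanB (tokens : List String) (fuel : Nat) (e : Int) : Int :=
  match fuel with
  | 0 => e
  | Nat.succ fuel =>
    match PySem.List.pyGet? tokens (e + 2) with
    | none => e
    | some sep => if pvContent sep = "," then pvScanB tokens fuel (e + 3) else e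

def compile_parameter_list_alt (tokens : List String) (index : Int) (output : List String) : Int :=
  let output := output ++ ["<parameterList>"]
  match PySem.List.pyGet? tokens index with
  | none => index
  | some t =>
    if pvContent t = ")" then index
    else
      let e := pvScanB tokens (tokens.length + 1) index
      -- output.extend(tokens[i] for i in range(index, end+2)); output.append("</parameterList>")
      let _output := output ++
        (PySem.List.pyRange index (e + 2) 1).map (fun i => PySem.List.pyGetD tokens i "") ++
        ["</parameterList>"]
      e + 2

-- ===== PRECONDITION & SPEC =====
def pvContentAt? (tokens : List String) (i : Int) : Option String :=
  (PySem.List.pyGet? tokens i).map pvContent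

-- Pre_ holds exactly where Python A returns (no IndexError): tokens[index] exists and either
-- its content is ')' or the comma-separated chain terminates with a non-',' separator in range.
def Pre_compile_parameter_list (tokens : List String) (index : Int) (output : List String) : Prop :=
  (pvContentAt? tokens index).isSome ∧
  (pvContentAt? tokens index = some ")" ∨
    ∃ n, n < tokens.length + 1 ∧
      (∀ k < n, pvContentAt? tokens (index + 3 * (k : Int) + 2) = some ",") ∧
      ((pvContentAt? tokens (index + 3 * (n : Int) + 2)).isSome ∧
        pvContentAt? tokens (index + 3 * (n : Int) + 2) ≠ some ",") ∧
      (∀ k ≤ n, (PySem.List.pyGet? tokens (index + 3 * (k : Int))).isSome ∧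
        (PySem.List.pyGet? tokens (index + 3 * (k : Int) + 1)).isSome))

instance (tokens : List String) (index : Int) (output : List String) :
    Decidable (Pre_compile_parameter_list tokens index output) := by
  unfold Pre_compile_parameter_list; infer_instance

def pvWitness_compile_parameter_list : List String × Int × List String :=
  (["<keyword>int</keyword>", "<identifier>x</identifier>", "<symbol>)</symbol>"], 0, [])

def Spec_compile_parameter_list (tokens : List String) (index : Int) (output : List String) (out : Int) : Prop := out = compile_parameter_list_alt tokens index output
instance (tokens : List String) (index : Int) (output : List String) (out : Int) : Decidable (Spec_compile_parameter_list tokens index output out) := by unfold Spec_compile_parameter_list; infer_instance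

-- ===== CLAIM (what is proved, stated in full; the proofs are below) =====
def Claim_equal_compile_parameter_list : Prop := ∀ (tokens : List String) (index : Int) (output : List String), Dom_compile_parameter_list tokens index output → Pre_compile_parameter_list tokens index output → Spec_compile_parameter_list tokens index output (compile_parameter_list tokens index output)

-- ===== LEMMAS AND PROOFS =====

theorem pvScanB_eq (tokens : List String) :
    ∀ (n : Nat) (fuel : Nat) (e : Int), n < fuel →
    (∀ k < n, pvContentAt? tokens (e + 3 * (k : Int) + 2) = some ",") →
    (pvContentAt? tokens (e + 3 * (n : Int) + 2)).isSome →
    pvContentAt? tokens (e + 3 * (n : Int) + 2) ≠ some "," →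
    pvScanB tokens fuel e = e + 3 * n := by
  intro n
  induction n with
  | zero =>
    intro fuel e hf hc hs hne
    cases fuel with
    | zero => omega
    | succ f =>
      simp only [pvContentAt?, Nat.cast_zero, mul_zero, add_zero] at hs hne
      cases h : PySem.List.pyGet? tokens (e + 2) with
      | none => rw [h] at hs; simp at hs
      | some sep =>
        rw [h] at hne
        have hne' : pvContent sep ≠ "," := by simpa using hne
        simp only [pvScanB, h, if_neg hne', Nat.cast_zero, mul_zero, add_zero]
  | succ m ih =>
    intro fuel e hf hc hs hne
    cases fuel with
    | zero => omega
    | succ f =>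
      have h0 := hc 0 (Nat.succ_pos m)
      simp only [pvContentAt?, Nat.cast_zero, mul_zero, add_zero] at h0
      cases h : PySem.List.pyGet? tokens (e + 2) with
      | none => rw [h] at h0; simp at h0
      | some sep =>
        rw [h] at h0
        simp only [Option.map_some, Option.some.injEq] at h0
        simp only [pvScanB, h, h0, if_pos]
        have := ih f (e + 3) (by omega)
          (fun k hk => by
            have := hc (k + 1) (by omega)
            convert this using 3
            push_cast; ring)
          (by
            convert hs using 3
            push_cast; ring)
          (by
            convert hne using 3
            push_cast; ring)
        rw [this]; push_cast; ring

theorem pvLoopA_eq (tokens : List String) :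
    ∀ (n : Nat) (fuel : Nat) (index : Int) (token : String) (output : List String), n < fuel →
    (∀ k < n, pvContentAt? tokens (index + 3 * (k : Int) + 2) = some ",") →
    (pvContentAt? tokens (index + 3 * (n : Int) + 2)).isSome →
    pvContentAt? tokens (index + 3 * (n : Int) + 2) ≠ some "," →
    (∀ k ≤ n, (PySem.List.pyGet? tokens (index + 3 * (k : Int))).isSome ∧
      (PySem.List.pyGet? tokens (index + 3 * (k : Int) + 1)).isSome) →
    pvLoopA tokens fuel index token output = index + 3 * n + 2 := by
  intro n
  induction n with
  | zero =>
    intro fuel index token output hf hc hs hne hg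
    cases fuel with
    | zero => omega
    | succ f =>
      simp only [pvContentAt?, Nat.cast_zero, mul_zero, add_zero] at hs hne
      have h1 := (hg 0 (Nat.le_refl 0)).2
      simp only [Nat.cast_zero, mul_zero, add_zero] at h1
      cases hv : PySem.List.pyGet? tokens (index + 1) with
      | none => rw [hv] at h1; simp at h1
      | some varName =>
        cases h2 : PySem.List.pyGet? tokens (index + 2) with
        | none => rw [h2] at hs; simp at hs
        | some sep =>
          rw [h2] at hne
          have hne' : pvContent sep ≠ "," := by simpa using hne
          simp only [pvLoopA, hv]
          rw [show (index : Int) + 1 + 1 = index + 2 by ring, h2]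
          simp only [if_pos hne', Nat.cast_zero, mul_zero, add_zero]
  | succ m ih =>
    intro fuel index token output hf hc hs hne hg
    cases fuel with
    | zero => omega
    | succ f =>
      have h0 := hc 0 (Nat.succ_pos m)
      simp only [pvContentAt?, Nat.cast_zero, mul_zero, add_zero] at h0
      have h1 := (hg 0 (Nat.zero_le _)).2
      simp only [Nat.cast_zero, mul_zero, add_zero] at h1
      have h3 := (hg 1 (by omega)).1
      simp only [Nat.cast_one, mul_one] at h3
      cases hv : PySem.List.pyGet? tokens (index + 1) with
      | none => rw [hv] at h1; simp at h1
      | some varName =>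
        cases h2 : PySem.List.pyGet? tokens (index + 2) with
        | none => rw [h2] at h0; simp at h0
        | some sep =>
          rw [h2] at h0
          simp only [Option.map_some, Option.some.injEq] at h0
          cases ht : PySem.List.pyGet? tokens (index + 3) with
          | none => rw [ht] at h3; simp at h3
          | some nextTy =>
            simp only [pvLoopA, hv]
            rw [show (index : Int) + 1 + 1 = index + 2 by ring]
            simp only [h2, h0, ne_eq, not_true_eq_false, if_false]
            rw [show (index : Int) + 2 + 1 = index + 3 by ring]
            simp only [ht]
            have := ih f (index + 3) nextTy
              (output ++ [token] ++ [varName] ++ [sep]) (by omega)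
              (fun k hk => by
                have := hc (k + 1) (by omega)
                convert this using 3
                push_cast; ring)
              (by convert hs using 3; push_cast; ring)
              (by convert hne using 3; push_cast; ring)
              (fun k hk => by
                have := hg (k + 1) (by omega)
                constructor
                · have h := this.1; convert h using 3; push_cast; ring
                · have h := this.2; convert h using 3; push_cast; ring)
            rw [this]; push_cast; ring

-- ===== VERDICT (by name: the statement is the Claim_ definition above) =====
theorem compile_parameter_list_spec : Claim_equal_compile_parameter_list := by
  intro tokens index output _hdom hpre
  obtain ⟨hsome, hrest⟩ := hpre
  unfold Spec_compile_parameter_list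
  unfold compile_parameter_list compile_parameter_list_alt
  cases h : PySem.List.pyGet? tokens index with
  | none => simp [pvContentAt?, h] at hsome
  | some t =>
    simp only
    by_cases hpar : pvContent t = ")"
    · simp [hpar]
    · simp only [hpar, ite_false]
      have hc0 : pvContentAt? tokens index = some (pvContent t) := by
        simp [pvContentAt?, h]
      rcases hrest with hclose | ⟨n, hn, hc, ⟨hs, hne⟩, hg⟩
      · rw [hc0] at hclose
        simp only [Option.some.injEq] at hclose
        exact absurd hclose hpar
      · rw [pvLoopA_eq tokens n (tokens.length + 1) index t
          (output ++ ["<parameterList>"]) (by omega) hc hs hne hg]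
        rw [pvScanB_eq tokens n (tokens.length + 1) index (by omega) hc hs hne]
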